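-- pv_equiv track=rewrite | github.com/hvermaQ/VQE | rough_calc.py | gate_ct
-- ===== SOURCE A (Python) =====
-- one_qb_gateset = ['H', 'X', 'Y', 'Z', 'RX', 'RY', 'RZ', 'I']
--
-- two_qb_gateset = ['CNOT', 'CSIGN']
--
-- def gate_ct(in_circ):
--     N_1qb = 0
--     N_2qb = 0
--     for tt1 in one_qb_gateset:
--         N_1qb += in_circ.count(tt1)
--     for tt2 in two_qb_gateset:
--         N_2qb += in_circ.count(tt2)
--     return(N_1qb, N_2qb)
-- ===== SOURCE B (Python) =====
-- one_qb_gateset = ['H', 'X', 'Y', 'Z', 'RX', 'RY', 'RZ', 'I']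
--
-- two_qb_gateset = ['CNOT', 'CSIGN']
--
-- def gate_ct(in_circ):
--     # one pass over the string: at each position, tally which gate names start there
--     n1 = 0
--     n2 = 0
--     for i in range(len(in_circ)):
--         for g in one_qb_gateset:
--             if in_circ.startswith(g, i):
--                 n1 += 1
--         for g in two_qb_gateset:
--             if in_circ.startswith(g, i):
--                 n2 += 1
--     return (n1, n2)
-- ===== Notes on version B (the rewrite author's own statement) =====
-- stated objective: alternative
-- what changed: Replaces A's ten separate whole-string str.count scans (one per gate name) by a single indexed pass over the string that, at each position, tallies which gate names start there; correctness rests on no gate name self-overlapping, so non-overlapping substring counts equal start-position counts.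
import Mathlib
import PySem

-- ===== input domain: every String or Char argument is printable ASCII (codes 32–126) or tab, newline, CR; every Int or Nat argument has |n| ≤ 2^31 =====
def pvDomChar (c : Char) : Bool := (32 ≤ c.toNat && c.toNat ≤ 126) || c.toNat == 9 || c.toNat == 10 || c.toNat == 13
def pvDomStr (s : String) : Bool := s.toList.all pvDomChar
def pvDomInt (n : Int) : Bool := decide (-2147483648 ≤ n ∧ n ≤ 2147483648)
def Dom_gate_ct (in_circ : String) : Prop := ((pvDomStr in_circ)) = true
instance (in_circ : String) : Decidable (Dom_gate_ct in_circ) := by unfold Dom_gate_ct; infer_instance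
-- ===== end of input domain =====

-- B replaces A's ten whole-string .count scans by ONE left-to-right pass over the
-- string, tallying at each position which gate names start there (objective: alternative).

-- ===== PORT A =====
def one_qb_gateset : List String := ["H", "X", "Y", "Z", "RX", "RY", "RZ", "I"]

def two_qb_gateset : List String := ["CNOT", "CSIGN"]

def gate_ct (in_circ : String) : Int × Int :=
  let N_1qb : Int := one_qb_gateset.foldl (fun acc tt1 => acc + (PySem.Str.count in_circ tt1 : Int)) 0
  let N_2qb : Int := two_qb_gateset.foldl (fun acc tt2 => acc + (PySem.Str.count in_circ tt2 : Int)) 0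
  (N_1qb, N_2qb)

-- ===== PORT B =====
-- the body of B's inner for-loops: tallies over one gateset at the suffix starting at
-- the current position ('in_circ.startswith(g, i)' = g is a prefix of the suffix at i;
-- exact since i ranges over 0..len-1)
def altStep (gs : List String) (suf : List Char) (n : Int) : Int :=
  gs.foldl (fun acc g => if PySem.Chars.startswith suf g.toList then acc + 1 else acc) n

-- B's 'for i in range(len(in_circ))' loop over code-point positions
def gate_ct_alt (in_circ : String) : Int × Int :=
  (PySem.List.pyRange 0 (in_circ.length : Int) 1).foldl
    (fun (p : Int × Int) i =>
      (altStep one_qb_gateset (in_circ.toList.drop i.toNat) p.1,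
       altStep two_qb_gateset (in_circ.toList.drop i.toNat) p.2)) (0, 0)

-- ===== PRECONDITION & SPEC =====
def Spec_gate_ct (in_circ : String) (out : Int × Int) : Prop := out = gate_ct_alt in_circ
instance (in_circ : String) (out : Int × Int) : Decidable (Spec_gate_ct in_circ out) := by unfold Spec_gate_ct; infer_instance

-- ===== CLAIM (what is proved, stated in full; the proofs are below) =====
def Claim_equal_gate_ct : Prop := ∀ (in_circ : String), Dom_gate_ct in_circ → Spec_gate_ct in_circ (gate_ct in_circ)

-- ===== LEMMAS AND PROOFS =====

-- number of positions of l at which g starts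
def sufCount (g : List Char) : List Char → Nat
  | [] => 0
  | c :: t => (if g.isPrefixOf (c :: t) then 1 else 0) + sufCount g t

-- no gate name self-overlaps (its first char does not recur in it), so after a match
-- the next g.length - 1 positions carry no match and Python's non-overlapping
-- str.count agrees with the count over all start positions.
lemma sufCount_append_of_head_notin (a : Char) (gs : List Char) (r p : List Char)
    (hp : ∀ c ∈ p, c ≠ a) : sufCount (a :: gs) (p ++ r) = sufCount (a :: gs) r := by
  induction p with
  | nil => rfl
  | cons c p ih =>
    have hc : (a == c) = false := by
      simp only [beq_eq_false_iff_ne]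
      exact fun h => hp c (by simp) h.symm
    simp [sufCount, List.isPrefixOf, hc, ih (fun d hd => hp d (by simp [hd]))]

lemma sufCount_skip (a : Char) (gs : List Char) (ha : a ∉ gs) (l : List Char)
    (h : (a :: gs).isPrefixOf l = true) :
    sufCount (a :: gs) l = 1 + sufCount (a :: gs) (l.drop (a :: gs).length) := by
  rw [List.isPrefixOf_iff_prefix] at h
  obtain ⟨r, rfl⟩ := h
  have hgs : ∀ c ∈ gs, c ≠ a := fun c hc he => ha (he ▸ hc)
  have h1 : sufCount (a :: gs) (gs ++ r) = sufCount (a :: gs) r :=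
    sufCount_append_of_head_notin a gs r gs hgs
  have hpref : (a :: gs).isPrefixOf (a :: gs ++ r) = true :=
    List.isPrefixOf_iff_prefix.mpr ⟨r, rfl⟩
  rw [List.drop_left, List.cons_append]
  simp only [sufCount]
  rw [if_pos (by rw [← List.cons_append]; exact hpref), h1]

lemma count_go_eq (a : Char) (gs : List Char) (ha : a ∉ gs) :
    ∀ (fuel : Nat) (l : List Char) (acc : Nat), l.length ≤ fuel →
      PySem.Chars.count.go (a :: gs) fuel l acc = acc + sufCount (a :: gs) l := by
  intro fuel
  induction fuel with
  | zero =>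
    intro l acc h
    have : l = [] := List.eq_nil_of_length_eq_zero (Nat.le_zero.mp h)
    subst this; rfl
  | succ fuel ih =>
    intro l acc h
    match l with
    | [] => rfl
    | c :: t =>
      rw [PySem.Chars.count.go]
      by_cases hpre : (a :: gs).isPrefixOf (c :: t) = true
      · rw [if_pos hpre]
        have hlen : ((c :: t).drop (a :: gs).length).length ≤ fuel := by
          simp only [List.length_drop]
          simp only [List.length_cons] at h ⊢
          omega
        rw [ih _ _ hlen, sufCount_skip a gs ha _ hpre]
        omega
      · rw [if_neg hpre]
        have hlen : t.length ≤ fuel := by simp only [List.length_cons] at h; omega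
        rw [ih _ _ hlen]
        simp [sufCount, hpre]

lemma count_eq_sufCount (s : List Char) (a : Char) (gs : List Char) (ha : a ∉ gs) :
    PySem.Chars.count s (a :: gs) = sufCount (a :: gs) s := by
  unfold PySem.Chars.count
  rw [if_neg (by simp)]
  rw [count_go_eq a gs ha s.length s 0 le_rfl]
  omega

lemma altStep_eq (gs : List String) (l : List Char) : ∀ n : Int,
    altStep gs l n = n + (gs.map (fun g => if g.toList.isPrefixOf l then (1 : Int) else 0)).sum := by
  induction gs with
  | nil => intro n; simp [altStep]
  | cons g gs ih =>
    intro n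
    show altStep gs l (if PySem.Chars.startswith l g.toList then n + 1 else n) = _
    rw [ih]
    simp only [PySem.Chars.startswith, List.map_cons, List.sum_cons]
    split_ifs <;> ring

lemma sufCount_cons_int (g : List Char) (c : Char) (t : List Char) :
    (sufCount g (c :: t) : Int) =
      (if g.isPrefixOf (c :: t) then (1 : Int) else 0) + (sufCount g t : Int) := by
  rw [sufCount]
  push_cast
  split_ifs <;> simp

lemma sum_sufCount_cons (gs : List String) (c : Char) (t : List Char) :
    (gs.map (fun g => (sufCount g.toList (c :: t) : Int))).sum =
      (gs.map (fun g => if g.toList.isPrefixOf (c :: t) then (1 : Int) else 0)).sum +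
        (gs.map (fun g => (sufCount g.toList t : Int))).sum := by
  induction gs with
  | nil => simp
  | cons g gs ih =>
    simp only [List.map_cons, List.sum_cons]
    rw [ih, sufCount_cons_int]
    ring

-- the per-position tallies of B, summed over all start positions
lemma altGo_eq (l : List Char) : ∀ n1 n2 : Int,
    (List.range l.length).foldl
      (fun (p : Int × Int) (i : Nat) =>
        (altStep one_qb_gateset (l.drop i) p.1, altStep two_qb_gateset (l.drop i) p.2))
      (n1, n2) =
      (n1 + (one_qb_gateset.map (fun g => (sufCount g.toList l : Int))).sum,
       n2 + (two_qb_gateset.map (fun g => (sufCount g.toList l : Int))).sum) := by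
  induction l with
  | nil =>
    intro n1 n2
    simp [one_qb_gateset, two_qb_gateset, sufCount]
  | cons c t ih =>
    intro n1 n2
    rw [List.length_cons, List.range_succ_eq_map, List.foldl_cons, List.foldl_map]
    simp only [List.drop_succ_cons, List.drop_zero]
    rw [ih, altStep_eq, altStep_eq, sum_sufCount_cons, sum_sufCount_cons, Prod.mk.injEq]
    constructor <;> ring

lemma count_str_eq (sub : String) (s : String) (a : Char) (gs : List Char)
    (hsub : sub.toList = a :: gs) (ha : a ∉ gs) :
    (PySem.Str.count s sub : Int) = (sufCount sub.toList s.toList : Int) := by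
  rw [PySem.Str.count_eq, hsub, count_eq_sufCount s.toList a gs ha]

-- ===== VERDICT (by name: the statement is the Claim_ definition above) =====
theorem gate_ct_spec : Claim_equal_gate_ct := by
  intro s _
  unfold Spec_gate_ct gate_ct gate_ct_alt
  rw [PySem.List.pyRange_zero_natCast, List.foldl_map]
  simp only [Int.toNat_natCast]
  rw [show s.length = s.toList.length from rfl, altGo_eq]
  simp only [one_qb_gateset, two_qb_gateset, List.foldl, List.map_cons, List.map_nil,
    List.sum_cons, List.sum_nil, Prod.mk.injEq]
  rw [count_str_eq "H" s 'H' [] (by decide) (by decide),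
    count_str_eq "X" s 'X' [] (by decide) (by decide),
    count_str_eq "Y" s 'Y' [] (by decide) (by decide),
    count_str_eq "Z" s 'Z' [] (by decide) (by decide),
    count_str_eq "I" s 'I' [] (by decide) (by decide),
    count_str_eq "RX" s 'R' ['X'] (by decide) (by decide),
    count_str_eq "RY" s 'R' ['Y'] (by decide) (by decide),
    count_str_eq "RZ" s 'R' ['Z'] (by decide) (by decide),
    count_str_eq "CNOT" s 'C' ['N', 'O', 'T'] (by decide) (by decide),
    count_str_eq "CSIGN" s 'C' ['S', 'I', 'G', 'N'] (by decide) (by decide)]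
  constructor <;> ring
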